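-- pv_equiv track=rewrite | github.com/boranseckin/2PX3 | main.py | check_PS
-- ===== SOURCE A (Python) =====
-- def check_PS(maxima):
--     p1, p2, p3, p4, p5 = 0, 0, 0, 0, 0
--     for index, value in maxima.items():
--         if (index > 1430 and index < 1470): p1 = 1
--         if (index > 1470 and index < 1510): p2 = 1
--         if (index > 1580 and index < 1620): p3 = 1
--         if (index > 2900 and index < 2940): p4 = 1
--         if (index > 3000 and index < 3050): p5 = 1
--
--     return p1 + p2 + p3 + p4 + p5 >= 4
-- ===== SOURCE B (Python) =====
-- BANDS = [(1430, 1470), (1470, 1510), (1580, 1620), (2900, 2940), (3000, 3050)]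
--
-- def check_PS(maxima):
--     count = sum(1 for lo, hi in BANDS if any(lo < k < hi for k in maxima))
--     return count >= 4
-- ===== Notes on version B (the rewrite author's own statement) =====
-- stated objective: simpler
-- what changed: Replaces the per-key loop that sets five flag variables with a loop over a data-driven list of (lo,hi) bands, counting bands that contain some key via any(); single count instead of five flags.
import Mathlib
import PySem

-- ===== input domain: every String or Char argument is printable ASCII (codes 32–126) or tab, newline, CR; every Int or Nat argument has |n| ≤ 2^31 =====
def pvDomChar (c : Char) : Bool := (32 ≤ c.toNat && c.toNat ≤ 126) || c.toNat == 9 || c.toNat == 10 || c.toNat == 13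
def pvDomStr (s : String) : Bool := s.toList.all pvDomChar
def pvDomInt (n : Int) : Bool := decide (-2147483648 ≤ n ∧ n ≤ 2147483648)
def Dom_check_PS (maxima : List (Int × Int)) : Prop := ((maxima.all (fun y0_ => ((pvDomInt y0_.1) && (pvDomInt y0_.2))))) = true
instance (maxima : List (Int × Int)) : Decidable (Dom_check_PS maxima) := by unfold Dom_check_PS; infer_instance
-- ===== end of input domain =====

-- B replaces five flag variables set in a per-key loop by a band-table loop with a single count: simpler, same cost.

-- ===== PORT A =====
def check_PS (maxima : List (Int × Int)) : Bool :=
  let s := maxima.foldl (fun (p : Int × Int × Int × Int × Int) kv =>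
    let index := kv.1
    let p1 := if index > 1430 ∧ index < 1470 then 1 else p.1
    let p2 := if index > 1470 ∧ index < 1510 then 1 else p.2.1
    let p3 := if index > 1580 ∧ index < 1620 then 1 else p.2.2.1
    let p4 := if index > 2900 ∧ index < 2940 then 1 else p.2.2.2.1
    let p5 := if index > 3000 ∧ index < 3050 then 1 else p.2.2.2.2
    (p1, p2, p3, p4, p5)) ((0 : Int), (0 : Int), (0 : Int), (0 : Int), (0 : Int))
  decide (s.1 + s.2.1 + s.2.2.1 + s.2.2.2.1 + s.2.2.2.2 ≥ 4)

-- ===== PORT B =====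
def pvBands : List (Int × Int) := [(1430, 1470), (1470, 1510), (1580, 1620), (2900, 2940), (3000, 3050)]

def check_PS_alt (maxima : List (Int × Int)) : Bool :=
  let count : Int :=
    (pvBands.map (fun b =>
      if maxima.any (fun kv => b.1 < kv.1 ∧ kv.1 < b.2) then (1 : Int) else 0)).sum
  decide (count ≥ 4)

-- ===== PRECONDITION & SPEC =====
def Spec_check_PS (maxima : List (Int × Int)) (out : Bool) : Prop := out = check_PS_alt maxima
instance (maxima : List (Int × Int)) (out : Bool) : Decidable (Spec_check_PS maxima out) := by unfold Spec_check_PS; infer_instance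

-- ===== CLAIM (what is proved, stated in full; the proofs are below) =====
def Claim_equal_check_PS : Prop := ∀ (maxima : List (Int × Int)), Dom_check_PS maxima → Spec_check_PS maxima (check_PS maxima)

-- ===== LEMMAS AND PROOFS =====

-- indicator for one band over the remaining list, starting from flag x
def pvInd (lo hi : Int) (m : List (Int × Int)) (x : Int) : Int :=
  if m.any (fun kv => lo < kv.1 ∧ kv.1 < hi) then 1 else x

theorem pvInd_cons (lo hi : Int) (kv : Int × Int) (t : List (Int × Int)) (x : Int) :
    pvInd lo hi (kv :: t) x = pvInd lo hi t (if kv.1 > lo ∧ kv.1 < hi then 1 else x) := by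
  by_cases h : lo < kv.1 ∧ kv.1 < hi
  · simp [pvInd, List.any_cons, h, gt_iff_lt]
  · simp only [pvInd, List.any_cons, decide_eq_false h, Bool.false_or]
    rw [if_neg (show ¬(kv.1 > lo ∧ kv.1 < hi) by simpa [gt_iff_lt, and_comm] using h)]

theorem check_PS_foldl (m : List (Int × Int)) (p : Int × Int × Int × Int × Int) :
    m.foldl (fun (p : Int × Int × Int × Int × Int) kv =>
      let index := kv.1
      let p1 := if index > 1430 ∧ index < 1470 then 1 else p.1
      let p2 := if index > 1470 ∧ index < 1510 then 1 else p.2.1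
      let p3 := if index > 1580 ∧ index < 1620 then 1 else p.2.2.1
      let p4 := if index > 2900 ∧ index < 2940 then 1 else p.2.2.2.1
      let p5 := if index > 3000 ∧ index < 3050 then 1 else p.2.2.2.2
      (p1, p2, p3, p4, p5)) p
    = (pvInd 1430 1470 m p.1, pvInd 1470 1510 m p.2.1, pvInd 1580 1620 m p.2.2.1,
       pvInd 2900 2940 m p.2.2.2.1, pvInd 3000 3050 m p.2.2.2.2) := by
  induction m generalizing p with
  | nil => simp [pvInd]
  | cons kv t ih =>
      simp only [List.foldl_cons, ih, pvInd_cons]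

-- ===== VERDICT (by name: the statement is the Claim_ definition above) =====
theorem check_PS_spec : Claim_equal_check_PS := by
  intro maxima _
  show check_PS maxima = check_PS_alt maxima
  simp only [check_PS, check_PS_alt, pvBands, check_PS_foldl, List.map_cons, List.map_nil,
    List.sum_cons, List.sum_nil, pvInd]
  split_ifs <;> decide
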